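-- pv_equiv track=rewrite | github.com/mammalwithashell/google_foobar | lv4/running-with-bunnies-lv4/main.py | solution
-- ===== SOURCE A (Python) =====
-- import itertools
--
-- def solution(time, time_limit):
--     rows = len(time)
--     bc = rows - 2
--
--     # Floyd Warshal algorithm to detect negative cycles
--     for i in range(rows):
--         for j in range(rows):
--             for k in range(rows):
--                 time[j][k] = min(time[j][k], time[j][i] + time[i][k])
--
--     # if any diagonal values have a value less than 0
--     for r in range(rows):
--         if time[r][r] < 0:
--             return [i for i in range(bc)]
--
--     # walu through every permutation until we find one that can pass under the time limit
--     for i in reversed(range(bc + 1)):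
--         for perm in itertools.permutations(range(1, bc + 1), i):
--             perm = list(perm)
--             perm = [0] + perm + [-1]
--             path = [(perm[i - 1], perm[i]) for i in range(1, len(perm))]
--             total_time = sum(time[start][end] for start, end in path)
--             if total_time <= time_limit:
--                 perm.pop(0)
--                 perm.pop()
--                 return sorted([i - 1 for i in perm])
--     return None
-- ===== SOURCE B (Python) =====
-- def solution(time, time_limit):
--     rows = len(time)
--     bc = rows - 2
--
--     # shortest paths (Floyd-Warshall) on a working copy; negative diagonal => negative cycle
--     t = [row[:] for row in time]
--     for i in range(rows):
--         for j in range(rows):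
--             for k in range(rows):
--                 t[j][k] = min(t[j][k], t[j][i] + t[i][k])
--     for r in range(rows):
--         if t[r][r] < 0:
--             return [i for i in range(bc)]
--
--     def best(j, avail, m):
--         # minimum total cost of visiting m distinct nodes of avail starting from j,
--         # then going to the exit; None if m > len(avail)
--         if m == 0:
--             return t[j][-1]
--         b = None
--         for v in avail:
--             c = best(v, [w for w in avail if w != v], m - 1)
--             if c is not None:
--                 c = t[j][v] + c
--                 if b is None or c < b:
--                     b = c
--         return b
--
--     def greedy(j, avail, budget, m):
--         # lexicographically first sequence of m distinct nodes of avail whose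
--         # total cost (from j, ending at the exit) stays within budget
--         if m == 0:
--             return []
--         for v in avail:
--             c = best(v, [w for w in avail if w != v], m - 1)
--             if c is not None and t[j][v] + c <= budget:
--                 return [v] + greedy(v, [w for w in avail if w != v],
--                                     budget - t[j][v], m - 1)
--         return []
--
--     bunnies = list(range(1, bc + 1))
--     for m in reversed(range(bc + 1)):
--         b = best(0, bunnies, m)
--         if b is not None and b <= time_limit:
--             return sorted([v - 1 for v in greedy(0, bunnies, time_limit, m)])
--     return None
-- ===== Notes on version B (the rewrite author's own statement) =====
-- stated objective: alternative
-- what changed: Instead of enumerating every permutation of each size and summing its path, B recursively computes the minimum completion cost of visiting m remaining bunnies and greedily reconstructs the lexicographically first feasible tour from it; Pre_ excludes matrices with a row shorter than the number of rows, on which A raises IndexError.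
import Mathlib
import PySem

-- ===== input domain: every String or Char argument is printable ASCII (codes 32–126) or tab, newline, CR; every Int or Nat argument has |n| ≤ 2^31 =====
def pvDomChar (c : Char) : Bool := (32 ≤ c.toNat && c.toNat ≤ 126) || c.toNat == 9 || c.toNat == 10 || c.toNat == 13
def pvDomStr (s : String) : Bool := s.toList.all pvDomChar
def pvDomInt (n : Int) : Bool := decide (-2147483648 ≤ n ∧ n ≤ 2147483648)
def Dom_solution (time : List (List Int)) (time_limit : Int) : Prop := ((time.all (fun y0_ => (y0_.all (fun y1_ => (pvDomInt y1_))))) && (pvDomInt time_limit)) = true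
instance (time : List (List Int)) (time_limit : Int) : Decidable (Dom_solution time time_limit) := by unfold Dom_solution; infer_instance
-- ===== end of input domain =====

-- B replaces A's brute-force enumeration of all permutations by a min-cost-completion
-- recursion with greedy lexicographic reconstruction (objective: alternative algorithm,
-- same factorial worst case). A mutates its `time` argument in place (Floyd-Warshall);
-- B works on a copy — the equivalence proved here is about the return value only.

-- ===== PORT A =====
-- shared between the two ports: both Pythons run the identical Floyd-Warshall pass
-- (A in place, B on a copy — same values) and the identical negative-diagonal check.
def g2 (t : List (List Int)) (j k : Int) : Int :=
  PySem.List.pyGetD (PySem.List.pyGetD t j []) k 0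

def pvFW (time : List (List Int)) : List (List Int) :=
  let rows : Int := time.length
  (PySem.List.pyRange 0 rows 1).foldl (fun t i =>
    (PySem.List.pyRange 0 rows 1).foldl (fun t j =>
      (PySem.List.pyRange 0 rows 1).foldl (fun t k =>
        PySem.List.pySetD t j
          (PySem.List.pySetD (PySem.List.pyGetD t j []) k
            (min (g2 t j k) (g2 t j i + g2 t i k)))) t) t) time

-- itertools.permutations(pool, m) for a duplicate-free pool: lexicographic order,
-- each position takes the remaining elements in pool order
def permsA (pool : List Int) : Nat → List (List Int)
  | 0 => [[]]
  | m + 1 => pool.flatMap (fun v =>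
      (permsA (pool.filter (fun w => w ≠ v)) m).map (fun p => v :: p))

-- total_time of [0] + perm + [-1] summed over consecutive pairs
def costA (t : List (List Int)) (perm : List Int) : Int :=
  let full : List Int := 0 :: perm ++ [-1]
  (full.zip full.tail).foldl (fun acc p => acc + g2 t p.1 p.2) 0

-- for i in reversed(range(bc+1)): first feasible permutation, early return
def searchA (t : List (List Int)) (limit : Int) (pool : List Int) : Nat → Option (List Int)
  | 0 => none
  | k + 1 =>
    match (permsA pool k).find? (fun p => decide (costA t p ≤ limit)) with
    | some p => some (PySem.List.sorted (p.map (fun v => v - 1)) (fun x => x) false)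
    | none => searchA t limit pool k

def solution (time : List (List Int)) (time_limit : Int) : Option (List Int) :=
  let rows : Int := time.length
  let bc : Int := rows - 2
  let t := pvFW time
  if (PySem.List.pyRange 0 rows 1).any (fun r => decide (g2 t r r < 0)) then
    some (PySem.List.pyRange 0 bc 1)
  else
    searchA t time_limit (PySem.List.pyRange 1 (bc + 1) 1) (bc + 1).toNat

-- ===== PORT B =====
-- best(j, avail, m): minimum cost of visiting m distinct nodes of avail from j, then exit
def bestB (t : List (List Int)) : Int → List Int → Nat → Option Int
  | j, _, 0 => some (g2 t j (-1))
  | j, avail, m + 1 =>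
    avail.foldl (fun b v =>
      match bestB t v (avail.filter (fun w => w ≠ v)) m with
      | none => b
      | some c =>
        let c := g2 t j v + c
        match b with
        | none => some c
        | some b0 => if c < b0 then some c else some b0) none

-- greedy(j, avail, budget, m): lexicographically first feasible sequence of m nodes
def greedyB (t : List (List Int)) : Int → List Int → Int → Nat → List Int
  | _, _, _, 0 => []
  | j, avail, budget, m + 1 =>
    match avail.find? (fun v =>
        match bestB t v (avail.filter (fun w => w ≠ v)) m with
        | some c => decide (g2 t j v + c ≤ budget)
        | none => false) with
    | some v => v :: greedyB t v (avail.filter (fun w => w ≠ v)) (budget - g2 t j v) m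
    | none => []

def searchB (t : List (List Int)) (limit : Int) (pool : List Int) : Nat → Option (List Int)
  | 0 => none
  | k + 1 =>
    match bestB t 0 pool k with
    | some c =>
      if c ≤ limit then
        some (PySem.List.sorted ((greedyB t 0 pool limit k).map (fun v => v - 1)) (fun x => x) false)
      else searchB t limit pool k
    | none => searchB t limit pool k

def solution_alt (time : List (List Int)) (time_limit : Int) : Option (List Int) :=
  let rows : Int := time.length
  let bc : Int := rows - 2
  let t := pvFW time
  if (PySem.List.pyRange 0 rows 1).any (fun r => decide (g2 t r r < 0)) then
    some (PySem.List.pyRange 0 bc 1)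
  else
    searchB t time_limit (PySem.List.pyRange 1 (bc + 1) 1) (bc + 1).toNat

-- ===== PRECONDITION & SPEC =====
-- Pre_ excludes exactly the matrices with a row shorter than the number of rows, on which
-- Python A (and B) raises IndexError; on every other input both return normally.
def Pre_solution (time : List (List Int)) (time_limit : Int) : Prop :=
  ∀ r ∈ time, time.length ≤ r.length

instance (time : List (List Int)) (time_limit : Int) : Decidable (Pre_solution time time_limit) := by
  unfold Pre_solution; infer_instance

def pvWitness_solution : List (List Int) × Int :=
  ([[0, 1, 1, 1], [1, 0, 1, 1], [1, 1, 0, 1], [1, 1, 1, 0]], 3)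

def Spec_solution (time : List (List Int)) (time_limit : Int) (out : Option (List Int)) : Prop := out = solution_alt time time_limit
instance (time : List (List Int)) (time_limit : Int) (out : Option (List Int)) : Decidable (Spec_solution time time_limit out) := by unfold Spec_solution; infer_instance

-- ===== CLAIM (what is proved, stated in full; the proofs are below) =====
def Claim_equal_solution : Prop := ∀ (time : List (List Int)) (time_limit : Int), Dom_solution time time_limit → Pre_solution time time_limit → Spec_solution time time_limit (solution time time_limit)

-- ===== LEMMAS AND PROOFS =====

-- recursive form of A's path cost
def costR (t : List (List Int)) : Int → List Int → Int
  | j, [] => g2 t j (-1)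
  | j, v :: p => g2 t j v + costR t v p

theorem costFold (t : List (List Int)) :
    ∀ (p : List Int) (j acc : Int),
      (((j :: (p ++ [-1])).zip (p ++ [-1])).foldl (fun acc q => acc + g2 t q.1 q.2) acc)
        = acc + costR t j p := by
  intro p
  induction p with
  | nil => intro j acc; simp [costR]
  | cons v s ih =>
    intro j acc
    simp only [List.cons_append, List.zip_cons_cons, List.foldl_cons]
    rw [ih v (acc + g2 t j v)]
    simp only [costR]
    omega

theorem costA_eq (t : List (List Int)) (p : List Int) : costA t p = costR t 0 p := by
  unfold costA
  simp only [List.tail_cons]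
  have h := costFold t p 0 0
  simpa using h

-- the loop body of bestB's recursive case, named for the foldl lemmas
def stepB (t : List (List Int)) (pool : List Int) (j : Int) (m : Nat)
    (b : Option Int) (v : Int) : Option Int :=
  match bestB t v (pool.filter (fun w => w ≠ v)) m with
  | none => b
  | some c =>
    match b with
    | none => some (g2 t j v + c)
    | some b0 => if g2 t j v + c < b0 then some (g2 t j v + c) else some b0

theorem bestB_succ (t : List (List Int)) (pool : List Int) (j : Int) (m : Nat) :
    bestB t j pool (m + 1) = pool.foldl (stepB t pool j m) none := by
  rfl

-- the search predicate of greedyB's recursive case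
def bfB (t : List (List Int)) (pool : List Int) (j budget : Int) (m : Nat) (v : Int) : Bool :=
  match bestB t v (pool.filter (fun w => w ≠ v)) m with
  | some c => decide (g2 t j v + c ≤ budget)
  | none => false

theorem greedyB_succ (t : List (List Int)) (pool : List Int) (j budget : Int) (m : Nat) :
    greedyB t j pool budget (m + 1) =
      match pool.find? (bfB t pool j budget m) with
      | some v => v :: greedyB t v (pool.filter (fun w => w ≠ v)) (budget - g2 t j v) m
      | none => [] := by
  rfl

theorem stepB_eval_none (t : List (List Int)) (pool : List Int) (j : Int) (m : Nat)
    (b : Option Int) (x : Int)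
    (hbx : bestB t x (pool.filter (fun w => w ≠ x)) m = none) :
    stepB t pool j m b x = b := by
  simp only [stepB]
  rw [hbx]

theorem stepB_eval_some_none (t : List (List Int)) (pool : List Int) (j : Int) (m : Nat)
    (x cx : Int)
    (hbx : bestB t x (pool.filter (fun w => w ≠ x)) m = some cx) :
    stepB t pool j m none x = some (g2 t j x + cx) := by
  simp only [stepB]
  rw [hbx]

theorem stepB_eval_some_some (t : List (List Int)) (pool : List Int) (j : Int) (m : Nat)
    (x cx b0 : Int)
    (hbx : bestB t x (pool.filter (fun w => w ≠ x)) m = some cx) :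
    stepB t pool j m (some b0) x =
      if g2 t j x + cx < b0 then some (g2 t j x + cx) else some b0 := by
  simp only [stepB]
  rw [hbx]

theorem foldl_stepB_none (t : List (List Int)) (pool : List Int) (j : Int) (m : Nat) :
    ∀ (xs : List Int) (b : Option Int),
      xs.foldl (stepB t pool j m) b = none ↔
        (b = none ∧ ∀ v ∈ xs, bestB t v (pool.filter (fun w => w ≠ v)) m = none) := by
  intro xs
  induction xs with
  | nil => intro b; simp
  | cons x xs ih =>
    intro b
    rw [List.foldl_cons, ih]
    cases hbx : bestB t x (pool.filter (fun w => w ≠ x)) m with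
    | none =>
      rw [stepB_eval_none t pool j m b x hbx]
      constructor
      · rintro ⟨h1, h2⟩
        refine ⟨h1, ?_⟩
        intro v hv
        rcases List.mem_cons.mp hv with rfl | hv
        · exact hbx
        · exact h2 v hv
      · rintro ⟨h1, h2⟩
        exact ⟨h1, fun v hv => h2 v (List.mem_cons_of_mem _ hv)⟩
    | some cx =>
      constructor
      · rintro ⟨h1, -⟩
        exfalso
        cases b with
        | none => rw [stepB_eval_some_none t pool j m x cx hbx] at h1; cases h1
        | some b0 =>
          rw [stepB_eval_some_some t pool j m x cx b0 hbx] at h1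
          split at h1 <;> cases h1
      · rintro ⟨-, h2⟩
        have hx := h2 x (List.mem_cons_self ..)
        rw [hbx] at hx
        cases hx

theorem foldl_stepB_some (t : List (List Int)) (pool : List Int) (j : Int) (m : Nat) :
    ∀ (xs : List Int) (b : Option Int) (c : Int),
      xs.foldl (stepB t pool j m) b = some c →
        ((b = some c ∨ ∃ v ∈ xs, ∃ cv,
            bestB t v (pool.filter (fun w => w ≠ v)) m = some cv ∧ c = g2 t j v + cv) ∧
         (∀ b0, b = some b0 → c ≤ b0) ∧
         (∀ v ∈ xs, ∀ cv, bestB t v (pool.filter (fun w => w ≠ v)) m = some cv →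
            c ≤ g2 t j v + cv)) := by
  intro xs
  induction xs with
  | nil =>
    intro b c h
    simp only [List.foldl_nil] at h
    refine ⟨Or.inl h, ?_, by simp⟩
    intro b0 hb0
    rw [h] at hb0
    cases hb0
    exact le_refl _
  | cons x xs ih =>
    intro b c h
    rw [List.foldl_cons] at h
    obtain ⟨h1, h2, h3⟩ := ih (stepB t pool j m b x) c h
    cases hbx : bestB t x (pool.filter (fun w => w ≠ x)) m with
    | none =>
      rw [stepB_eval_none t pool j m b x hbx] at h1 h2
      refine ⟨?_, h2, ?_⟩
      · rcases h1 with h1 | ⟨v, hv, cv, hc1, hc2⟩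
        · exact Or.inl h1
        · exact Or.inr ⟨v, List.mem_cons_of_mem _ hv, cv, hc1, hc2⟩
      · intro v hv cv hcv
        rcases List.mem_cons.mp hv with rfl | hv
        · rw [hbx] at hcv; cases hcv
        · exact h3 v hv cv hcv
    | some cx =>
      cases b with
      | none =>
        rw [stepB_eval_some_none t pool j m x cx hbx] at h1 h2
        have hcle : c ≤ g2 t j x + cx := h2 _ rfl
        refine ⟨?_, ?_, ?_⟩
        · rcases h1 with h1 | ⟨v, hv, cv, hc1, hc2⟩
          · cases h1
            exact Or.inr ⟨x, List.mem_cons_self .., cx, hbx, rfl⟩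
          · exact Or.inr ⟨v, List.mem_cons_of_mem _ hv, cv, hc1, hc2⟩
        · intro b0 hb0
          cases hb0
        · intro v hv cv hcv
          rcases List.mem_cons.mp hv with rfl | hv
          · rw [hbx] at hcv
            cases hcv
            exact hcle
          · exact h3 v hv cv hcv
      | some b0 =>
        rw [stepB_eval_some_some t pool j m x cx b0 hbx] at h1 h2
        by_cases hlt : g2 t j x + cx < b0
        · rw [if_pos hlt] at h1 h2
          have hcle : c ≤ g2 t j x + cx := h2 _ rfl
          refine ⟨?_, ?_, ?_⟩
          · rcases h1 with h1 | ⟨v, hv, cv, hc1, hc2⟩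
            · cases h1
              exact Or.inr ⟨x, List.mem_cons_self .., cx, hbx, rfl⟩
            · exact Or.inr ⟨v, List.mem_cons_of_mem _ hv, cv, hc1, hc2⟩
          · intro b0' hb0'
            cases hb0'
            omega
          · intro v hv cv hcv
            rcases List.mem_cons.mp hv with rfl | hv
            · rw [hbx] at hcv
              cases hcv
              exact hcle
            · exact h3 v hv cv hcv
        · rw [if_neg hlt] at h1 h2
          have hcb0 : c ≤ b0 := h2 _ rfl
          refine ⟨?_, ?_, ?_⟩
          · rcases h1 with h1 | ⟨v, hv, cv, hc1, hc2⟩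
            · cases h1
              exact Or.inl rfl
            · exact Or.inr ⟨v, List.mem_cons_of_mem _ hv, cv, hc1, hc2⟩
          · intro b0' hb0'
            cases hb0'
            exact hcb0
          · intro v hv cv hcv
            rcases List.mem_cons.mp hv with rfl | hv
            · rw [hbx] at hcv
              cases hcv
              omega
            · exact h3 v hv cv hcv

theorem bestB_spec (t : List (List Int)) :
    ∀ (m : Nat) (pool : List Int) (j : Int),
      (∀ c, bestB t j pool m = some c →
          ((∃ p ∈ permsA pool m, costR t j p = c) ∧ ∀ p ∈ permsA pool m, c ≤ costR t j p)) ∧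
      (bestB t j pool m = none → permsA pool m = []) := by
  intro m
  induction m with
  | zero =>
    intro pool j
    constructor
    · intro c hc
      simp only [bestB, Option.some.injEq] at hc
      constructor
      · exact ⟨[], by simp [permsA], by simp [costR, hc]⟩
      · intro p hp
        simp only [permsA, List.mem_singleton] at hp
        subst hp
        simp only [costR]
        omega
    · intro h
      simp [bestB] at h
  | succ m ih =>
    intro pool j
    constructor
    · intro c hc
      rw [bestB_succ] at hc
      obtain ⟨h1, h2, h3⟩ := foldl_stepB_some t pool j m pool none c hc
      constructor
      · rcases h1 with h1 | ⟨v, hv, cv, hbv, rfl⟩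
        · cases h1
        · obtain ⟨⟨q, hq, hcq⟩, -⟩ := (ih (pool.filter (fun w => w ≠ v)) v).1 cv hbv
          refine ⟨v :: q, ?_, ?_⟩
          · simp only [permsA]
            exact List.mem_flatMap.mpr ⟨v, hv, List.mem_map.mpr ⟨q, hq, rfl⟩⟩
          · simp only [costR, hcq]
      · intro p hp
        simp only [permsA, List.mem_flatMap, List.mem_map] at hp
        obtain ⟨v, hv, q, hq, rfl⟩ := hp
        cases hbv : bestB t v (pool.filter (fun w => w ≠ v)) m with
        | none =>
          rw [(ih _ v).2 hbv] at hq
          cases hq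
        | some cv =>
          have hlb := ((ih _ v).1 cv hbv).2 q hq
          have hcv := h3 v hv cv hbv
          simp only [costR]
          omega
    · intro hc
      rw [bestB_succ] at hc
      obtain ⟨-, h2⟩ := (foldl_stepB_none t pool j m pool none).mp hc
      simp only [permsA]
      rw [List.flatMap_eq_nil_iff]
      intro v hv
      rw [(ih _ v).2 (h2 v hv)]
      rfl

theorem find_eq_greedy (t : List (List Int)) :
    ∀ (m : Nat) (pool : List Int) (j budget c : Int),
      bestB t j pool m = some c → c ≤ budget →
      (permsA pool m).find? (fun p => decide (costR t j p ≤ budget)) =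
        some (greedyB t j pool budget m) := by
  intro m
  induction m with
  | zero =>
    intro pool j budget c hb hc
    simp only [bestB, Option.some.injEq] at hb
    have hg : costR t j [] ≤ budget := by
      simp only [costR]
      omega
    simp only [permsA, greedyB]
    rw [List.find?_cons_of_pos (by simpa using hg)]
  | succ m ih =>
    intro pool j budget c hb hc
    have hex : pool.find? (bfB t pool j budget m) ≠ none := by
      intro hnone
      have hall := List.find?_eq_none.mp hnone
      obtain ⟨⟨p, hp, hcp⟩, -⟩ := (bestB_spec t (m + 1) pool j).1 c hb
      simp only [permsA, List.mem_flatMap, List.mem_map] at hp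
      obtain ⟨v, hv, q, hq, rfl⟩ := hp
      cases hbv : bestB t v (pool.filter (fun w => w ≠ v)) m with
      | none =>
        rw [(bestB_spec t m _ v).2 hbv] at hq
        cases hq
      | some cv =>
        have hlb := ((bestB_spec t m _ v).1 cv hbv).2 q hq
        have hcp' : g2 t j v + costR t v q = c := by simpa [costR] using hcp
        have hbf : bfB t pool j budget m v = true := by
          unfold bfB
          rw [hbv]
          simp only [decide_eq_true_eq]
          omega
        exact hall v hv hbf
    obtain ⟨v₀, hv₀⟩ := Option.ne_none_iff_exists'.mp hex
    have aux : ∀ (xs : List Int) (v : Int), xs.find? (bfB t pool j budget m) = some v →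
        (xs.flatMap (fun u =>
            (permsA (pool.filter (fun w => w ≠ u)) m).map (fun p => u :: p))).find?
            (fun p => decide (costR t j p ≤ budget)) =
          some (v :: greedyB t v (pool.filter (fun w => w ≠ v)) (budget - g2 t j v) m) := by
      intro xs
      induction xs with
      | nil => intro v h; simp at h
      | cons x xs ihx =>
        intro v h
        by_cases hbfx : bfB t pool j budget m x = true
        · rw [List.find?_cons_of_pos hbfx] at h
          have hvx : x = v := by injection h
          subst hvx
          obtain ⟨cx, hbb, hle⟩ : ∃ cx,
              bestB t x (pool.filter (fun w => w ≠ x)) m = some cx ∧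
                g2 t j x + cx ≤ budget := by
            unfold bfB at hbfx
            cases hbb : bestB t x (pool.filter (fun w => w ≠ x)) m with
            | none => rw [hbb] at hbfx; simp at hbfx
            | some cx =>
              rw [hbb] at hbfx
              simp only [decide_eq_true_eq] at hbfx
              exact ⟨cx, rfl, hbfx⟩
          have hinner := ih (pool.filter (fun w => w ≠ x)) x (budget - g2 t j x) cx hbb (by omega)
          rw [List.flatMap_cons, List.find?_append]
          have hpred : ((fun p => decide (costR t j p ≤ budget)) ∘ (fun p => x :: p)) =
              (fun q => decide (costR t x q ≤ budget - g2 t j x)) := by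
            funext q
            simp only [Function.comp, costR, decide_eq_decide]
            omega
          rw [List.find?_map, hpred, hinner]
          rfl
        · have h' : xs.find? (bfB t pool j budget m) = some v := by
            rw [List.find?_cons_of_neg (by simpa using hbfx)] at h
            exact h
          have hblock : ((permsA (pool.filter (fun w => w ≠ x)) m).map
              (fun p => x :: p)).find? (fun p => decide (costR t j p ≤ budget)) = none := by
            cases hbb : bestB t x (pool.filter (fun w => w ≠ x)) m with
            | none =>
              rw [(bestB_spec t m _ x).2 hbb]
              rfl
            | some cx =>
              have hgt : ¬ (g2 t j x + cx ≤ budget) := by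
                unfold bfB at hbfx
                rw [hbb] at hbfx
                simpa using hbfx
              rw [List.find?_eq_none]
              intro p hp
              obtain ⟨q, hq, rfl⟩ := List.mem_map.mp hp
              have hlb := ((bestB_spec t m _ x).1 cx hbb).2 q hq
              simp only [costR, decide_eq_true_eq]
              omega
          rw [List.flatMap_cons, List.find?_append, hblock]
          simpa using ihx v h'
    have hres := aux pool v₀ hv₀
    rw [greedyB_succ, hv₀]
    simp only [permsA]
    exact hres

theorem search_eq (t : List (List Int)) (limit : Int) (pool : List Int) :
    ∀ k, searchA t limit pool k = searchB t limit pool k := by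
  intro k
  induction k with
  | zero => rfl
  | succ k ih =>
    simp only [searchA, searchB]
    cases hb : bestB t 0 pool k with
    | none =>
      rw [(bestB_spec t k pool 0).2 hb]
      simpa using ih
    | some c =>
      by_cases hc : c ≤ limit
      · have hpre : (fun p => decide (costA t p ≤ limit)) =
            (fun p => decide (costR t 0 p ≤ limit)) := by
          funext p
          rw [costA_eq]
        rw [hpre, find_eq_greedy t k pool 0 limit c hb hc]
        simp [hc]
      · have hnone : (permsA pool k).find? (fun p => decide (costA t p ≤ limit)) = none := by
          rw [List.find?_eq_none]
          intro p hp
          have hlb := ((bestB_spec t k pool 0).1 c hb).2 p hp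
          rw [costA_eq]
          simp only [decide_eq_true_eq]
          omega
        rw [hnone]
        simpa [hc] using ih

-- ===== VERDICT (by name: the statement is the Claim_ definition above) =====
theorem solution_spec : Claim_equal_solution := by
  intro time time_limit _ _
  unfold Spec_solution solution solution_alt
  simp only []
  split
  · rfl
  · exact search_eq _ _ _ _
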